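-- pv_equiv track=rewrite | github.com/QuBenhao/LeetCode | 1824/solution.py | minSideJumps
-- ===== SOURCE A (Python) =====
-- def minSideJumps(obstacles):
--     """
--     :type obstacles: List[int]
--     :rtype: int
--     """
--     # 贪心
--     n = len(obstacles)
--     curr = 2
--     lines = {1, 2, 3}
--     ans = 0
--     for i in range(n-1):
--         # an obstacle in front of
--         if obstacles[i+1] == curr:
--             # places can jump to
--             new_lines = lines - {curr, obstacles[i]}
--             if len(new_lines) == 1:
--                 curr = new_lines.pop()
--             else:
--                 # jump to the place where we can go as far as we can
--                 max_index = -1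
--                 for j in new_lines:
--                     try:
--                         index = list.index(obstacles, j,i+1,n)
--                         if index > max_index:
--                             max_index = index
--                             curr = j
--                     except:
--                         curr = j
--                         return ans + 1
--             ans += 1
--     return ans
-- ===== SOURCE B (Python) =====
-- def minSideJumps(obstacles):
--     n = len(obstacles)
--     # next-occurrence table, built back to front:
--     # nxt[k] = (first index >= k holding 1, same for 2, for 3; n when absent)
--     nxt = [(n, n, n)]
--     for i, v in reversed(list(enumerate(obstacles))):
--         a, b, c = nxt[-1]
--         nxt.append((i if v == 1 else a, i if v == 2 else b, i if v == 3 else c))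
--     nxt.reverse()
--     curr, ans = 2, 0
--     for i in range(n - 1):
--         if obstacles[i + 1] == curr:
--             cand = [l for l in (1, 2, 3) if l != curr and l != obstacles[i]]
--             if len(cand) == 1:
--                 curr = cand[0]
--             else:
--                 ia = nxt[i + 1][cand[0] - 1]
--                 ib = nxt[i + 1][cand[1] - 1]
--                 if ia >= n or ib >= n:
--                     return ans + 1
--                 curr = cand[1] if ib > ia else cand[0]
--             ans += 1
--     return ans
-- ===== Notes on version B (the rewrite author's own statement) =====
-- stated objective: alternative
-- what changed: A's greedy rescans the remaining suffix with list.index at every forced side jump; B precomputes, in one backward pass, a next-occurrence table for the three lanes and reads the two candidate distances from it, so the inner suffix scans disappear.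
import Mathlib
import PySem

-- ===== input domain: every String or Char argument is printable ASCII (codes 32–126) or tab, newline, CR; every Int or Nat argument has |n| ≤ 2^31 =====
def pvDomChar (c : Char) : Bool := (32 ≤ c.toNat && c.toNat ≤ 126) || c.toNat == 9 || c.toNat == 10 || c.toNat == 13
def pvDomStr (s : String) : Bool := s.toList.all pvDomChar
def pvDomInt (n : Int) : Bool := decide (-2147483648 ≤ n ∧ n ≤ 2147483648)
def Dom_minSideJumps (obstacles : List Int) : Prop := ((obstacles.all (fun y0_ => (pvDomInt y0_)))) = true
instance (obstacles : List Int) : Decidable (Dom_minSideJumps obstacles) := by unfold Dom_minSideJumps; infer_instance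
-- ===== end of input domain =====

-- B replaces A's repeated list.index scans over the remaining suffix by a next-occurrence
-- table for the three lanes built once back-to-front (objective: alternative; not measurably faster).

-- ===== PORT A =====
-- inner 'for j in new_lines' loop; 'some c' = loop finished with curr = c, 'none' = the early 'return ans + 1'.
-- (new_lines is a set of small ints built from the literal {1,2,3}: its iteration/pop order is ascending,
-- which is how the list newLines below is ordered; the returned value is in fact order-independent.)
def minSideJumpsInner (obstacles : List Int) (n i : Int) :
    List Int → Int → Int → Option Int
  | [], _, curr => some curr
  | j :: rest, maxIdx, curr =>
    -- list.index(obstacles, j, i+1, n) = i+1 + position of j in the slice obstacles[i+1:n]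
    match PySem.List.index? (PySem.List.slice obstacles (some (i + 1)) (some n)) j with
    | some k =>
        let index : Int := i + 1 + (k : Int)
        if index > maxIdx then minSideJumpsInner obstacles n i rest index j
        else minSideJumpsInner obstacles n i rest maxIdx curr
    | none => none

def minSideJumpsLoop (obstacles : List Int) (n : Int) :
    List Int → Int → Int → Int
  | [], _, ans => ans
  | i :: rest, curr, ans =>
    if PySem.List.pyGetD obstacles (i + 1) 0 == curr then  -- in range: i + 1 < n
      let newLines := PySem.Set.diff (PySem.Set.ofList [1, 2, 3])
        (PySem.Set.ofList [curr, PySem.List.pyGetD obstacles i 0])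
      if PySem.List.len newLines == 1 then
        minSideJumpsLoop obstacles n rest (newLines.headD 0) (ans + 1)  -- .pop() of a singleton set
      else
        match minSideJumpsInner obstacles n i newLines (-1) curr with
        | some c => minSideJumpsLoop obstacles n rest c (ans + 1)
        | none => ans + 1
    else
      minSideJumpsLoop obstacles n rest curr ans

def minSideJumps (obstacles : List Int) : Int :=
  let n := PySem.List.len obstacles
  minSideJumpsLoop obstacles n (PySem.List.pyRange 0 (n - 1) 1) 2 0

-- ===== PORT B =====
-- the backward 'for i, v in reversed(list(enumerate(obstacles)))' loop building nxt (rows kept front-first,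
-- i.e. already in the order Python's final nxt.reverse() produces); nxt[k] = (first index >= k holding 1, 2, 3; n when absent)
def minSideJumpsNxt (n : Int) : List Int → Int → List (Int × Int × Int)
  | [], _ => [(n, n, n)]
  | v :: rest, i =>
    let acc := minSideJumpsNxt n rest (i + 1)
    let t := acc.headD (n, n, n)
    ((if v == 1 then i else t.1), (if v == 2 then i else t.2.1), (if v == 3 then i else t.2.2)) :: acc

-- tuple indexing row[l-1] for a lane l in {1,2,3}
def minSideJumpsLane (t : Int × Int × Int) (l : Int) : Int :=
  if l == 1 then t.1 else if l == 2 then t.2.1 else t.2.2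

def minSideJumpsAltLoop (obstacles : List Int) (n : Int) (nxt : List (Int × Int × Int)) :
    List Int → Int → Int → Int
  | [], _, ans => ans
  | i :: rest, curr, ans =>
    if PySem.List.pyGetD obstacles (i + 1) 0 == curr then
      let cand := [1, 2, 3].filter (fun l => l != curr && l != PySem.List.pyGetD obstacles i 0)
      if PySem.List.len cand == 1 then
        minSideJumpsAltLoop obstacles n nxt rest (PySem.List.pyGetD cand 0 0) (ans + 1)
      else
        let row := PySem.List.pyGetD nxt (i + 1) (n, n, n)
        let ia := minSideJumpsLane row (PySem.List.pyGetD cand 0 0)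
        let ib := minSideJumpsLane row (PySem.List.pyGetD cand 1 0)
        if ia ≥ n ∨ ib ≥ n then ans + 1
        else minSideJumpsAltLoop obstacles n nxt rest
          (if ib > ia then PySem.List.pyGetD cand 1 0 else PySem.List.pyGetD cand 0 0) (ans + 1)
    else
      minSideJumpsAltLoop obstacles n nxt rest curr ans

def minSideJumps_alt (obstacles : List Int) : Int :=
  let n := PySem.List.len obstacles
  let nxt := minSideJumpsNxt n obstacles 0
  minSideJumpsAltLoop obstacles n nxt (PySem.List.pyRange 0 (n - 1) 1) 2 0

-- ===== PRECONDITION & SPEC =====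
def Spec_minSideJumps (obstacles : List Int) (out : Int) : Prop := out = minSideJumps_alt obstacles
instance (obstacles : List Int) (out : Int) : Decidable (Spec_minSideJumps obstacles out) := by unfold Spec_minSideJumps; infer_instance

-- ===== CLAIM (what is proved, stated in full; the proofs are below) =====
def Claim_equal_minSideJumps : Prop := ∀ (obstacles : List Int), Dom_minSideJumps obstacles → Spec_minSideJumps obstacles (minSideJumps obstacles)

-- ===== LEMMAS AND PROOFS =====

-- the value B's table stores for lane v at row built from xs with base index i
def nxtHead (xs : List Int) (n i v : Int) : Int :=
  match PySem.List.index? xs v with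
  | some m => i + (m : Int)
  | none => n

theorem nxtHead_cons (v : Int) (rest : List Int) (n i w : Int) :
    nxtHead (v :: rest) n i w = if v == w then i else nxtHead rest n (i + 1) w := by
  by_cases h : v = w
  · subst h
    unfold nxtHead
    rw [PySem.List.index?_cons_self]
    simp
  · unfold nxtHead
    rw [PySem.List.index?_cons_of_ne rest h]
    cases h' : PySem.List.index? rest w <;> simp [beq_eq_false_iff_ne.mpr h] <;> omega

theorem nxt_headD (n : Int) : ∀ (obs : List Int) (i : Int),
    (minSideJumpsNxt n obs i).headD (n, n, n)
      = (nxtHead obs n i 1, nxtHead obs n i 2, nxtHead obs n i 3) := by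
  intro obs
  induction obs with
  | nil => intro i; simp [minSideJumpsNxt, nxtHead]
  | cons v rest ih =>
    intro i
    simp only [minSideJumpsNxt, List.headD_cons, ih (i + 1),
      nxtHead_cons v rest n i 1, nxtHead_cons v rest n i 2, nxtHead_cons v rest n i 3]

theorem nxt_drop (n : Int) : ∀ (obs : List Int) (k : Nat) (i : Int), k ≤ obs.length →
    (minSideJumpsNxt n obs i).drop k = minSideJumpsNxt n (obs.drop k) (i + k) := by
  intro obs
  induction obs with
  | nil =>
    intro k i hk
    simp only [List.length_nil, Nat.le_zero] at hk
    subst hk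
    simp
  | cons v rest ih =>
    intro k i hk
    cases k with
    | zero => simp
    | succ k' =>
      simp only [minSideJumpsNxt, List.drop_succ_cons]
      rw [ih k' (i + 1) (by simpa using hk)]
      congr 1
      push_cast
      ring

theorem row_eq (obs : List Int) (n : Int) (k : Nat) (hk : k ≤ obs.length) :
    PySem.List.pyGetD (minSideJumpsNxt n obs 0) (k : Int) (n, n, n)
      = (nxtHead (obs.drop k) n k 1, nxtHead (obs.drop k) n k 2, nxtHead (obs.drop k) n k 3) := by
  rw [PySem.List.pyGetD_natCast]
  have h1 : (minSideJumpsNxt n obs 0).getD k (n, n, n)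
      = ((minSideJumpsNxt n obs 0).drop k).headD (n, n, n) := by
    simp [List.getD, List.headD_eq_head?_getD, List.head?_drop]
  rw [h1, nxt_drop n obs k 0 hk, nxt_headD]
  norm_num

theorem lane_row (xs : List Int) (n i j : Int) (hj : j = 1 ∨ j = 2 ∨ j = 3) :
    minSideJumpsLane (nxtHead xs n i 1, nxtHead xs n i 2, nxtHead xs n i 3) j
      = nxtHead xs n i j := by
  rcases hj with rfl | rfl | rfl <;> simp [minSideJumpsLane]

theorem slice_eq_drop (obs : List Int) (i : Int) (h0 : 0 ≤ i) :
    PySem.List.slice obs (some (i + 1)) (some (PySem.List.len obs)) = obs.drop (i + 1).toNat := by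
  rw [PySem.List.slice_toNat obs (by omega) (by simp [PySem.List.len_eq])]
  apply List.take_of_length_le
  simp [PySem.List.len_eq]

theorem diff_eq_filter (curr oi : Int) :
    PySem.Set.diff (PySem.Set.ofList [1, 2, 3]) (PySem.Set.ofList [curr, oi])
      = [1, 2, 3].filter (fun l => l != curr && l != oi) := by
  have h3 : PySem.Set.ofList [1, 2, 3] = ([1, 2, 3] : List Int) := by decide
  rw [PySem.Set.diff, h3]
  apply List.filter_congr
  intro x hx
  rw [Bool.eq_iff_iff]
  simp [PySem.Set.mem_ofList]

theorem inner_case (obs : List Int) (i : Int) (h0 : 0 ≤ i) (h1 : i + 1 < PySem.List.len obs)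
    (j1 j2 curr : Int) (hj1 : j1 = 1 ∨ j1 = 2 ∨ j1 = 3) (hj2 : j2 = 1 ∨ j2 = 2 ∨ j2 = 3) :
    minSideJumpsInner obs (PySem.List.len obs) i [j1, j2] (-1) curr
      = (if minSideJumpsLane (PySem.List.pyGetD (minSideJumpsNxt (PySem.List.len obs) obs 0) (i + 1) (PySem.List.len obs, PySem.List.len obs, PySem.List.len obs)) j1 ≥ PySem.List.len obs
            ∨ minSideJumpsLane (PySem.List.pyGetD (minSideJumpsNxt (PySem.List.len obs) obs 0) (i + 1) (PySem.List.len obs, PySem.List.len obs, PySem.List.len obs)) j2 ≥ PySem.List.len obs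
          then none
          else some (if minSideJumpsLane (PySem.List.pyGetD (minSideJumpsNxt (PySem.List.len obs) obs 0) (i + 1) (PySem.List.len obs, PySem.List.len obs, PySem.List.len obs)) j2
                        > minSideJumpsLane (PySem.List.pyGetD (minSideJumpsNxt (PySem.List.len obs) obs 0) (i + 1) (PySem.List.len obs, PySem.List.len obs, PySem.List.len obs)) j1
                     then j2 else j1)) := by
  have hL : PySem.List.len obs = (obs.length : Int) := PySem.List.len_eq obs
  set k : Nat := (i + 1).toNat with hkdef
  have hki : (k : Int) = i + 1 := by omega
  have hk : k ≤ obs.length := by omega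
  have hrow : PySem.List.pyGetD (minSideJumpsNxt (PySem.List.len obs) obs 0) (i + 1)
      (PySem.List.len obs, PySem.List.len obs, PySem.List.len obs)
      = (nxtHead (obs.drop k) (PySem.List.len obs) k 1, nxtHead (obs.drop k) (PySem.List.len obs) k 2,
         nxtHead (obs.drop k) (PySem.List.len obs) k 3) := by
    rw [← hki]
    exact row_eq obs (PySem.List.len obs) k hk
  rw [hrow, lane_row _ _ _ _ hj1, lane_row _ _ _ _ hj2]
  simp only [minSideJumpsInner]
  rw [slice_eq_drop obs i h0, ← hkdef]
  cases hI1 : PySem.List.index? (obs.drop k) j1 with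
  | none =>
    have e1 : nxtHead (obs.drop k) (PySem.List.len obs) k j1 = PySem.List.len obs := by
      unfold nxtHead; rw [hI1]
    dsimp only
    rw [if_pos (Or.inl (by omega))]
  | some m1 =>
    dsimp only
    have hm1 : m1 < (obs.drop k).length := (PySem.List.getElem_of_index?_eq_some hI1).fst
    have e1 : nxtHead (obs.drop k) (PySem.List.len obs) k j1 = i + 1 + m1 := by
      unfold nxtHead; rw [hI1, hki]
    have hlt1 : i + 1 + (m1 : Int) < PySem.List.len obs := by
      simp at hm1; omega
    rw [if_pos (show i + 1 + (m1 : Int) > -1 by omega)]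
    cases hI2 : PySem.List.index? (obs.drop k) j2 with
    | none =>
      have e2 : nxtHead (obs.drop k) (PySem.List.len obs) k j2 = PySem.List.len obs := by
        unfold nxtHead; rw [hI2]
      dsimp only
      rw [if_pos (Or.inr (by omega))]
    | some m2 =>
      dsimp only
      have hm2 : m2 < (obs.drop k).length := (PySem.List.getElem_of_index?_eq_some hI2).fst
      have e2 : nxtHead (obs.drop k) (PySem.List.len obs) k j2 = i + 1 + m2 := by
        unfold nxtHead; rw [hI2, hki]
      have hlt2 : i + 1 + (m2 : Int) < PySem.List.len obs := by
        simp at hm2; omega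
      by_cases hgt : i + 1 + (m2 : Int) > i + 1 + (m1 : Int)
      · rw [if_pos hgt, if_neg (show ¬(nxtHead (obs.drop k) (PySem.List.len obs) k j1 ≥ PySem.List.len obs
              ∨ nxtHead (obs.drop k) (PySem.List.len obs) k j2 ≥ PySem.List.len obs) by omega),
            if_pos (by omega)]
      · rw [if_neg hgt, if_neg (show ¬(nxtHead (obs.drop k) (PySem.List.len obs) k j1 ≥ PySem.List.len obs
              ∨ nxtHead (obs.drop k) (PySem.List.len obs) k j2 ≥ PySem.List.len obs) by omega),
            if_neg (by omega)]

theorem loop_eq (obs : List Int) : ∀ (js : List Int) (curr ans : Int),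
    (∀ x ∈ js, 0 ≤ x ∧ x + 1 < PySem.List.len obs) →
    (curr = 1 ∨ curr = 2 ∨ curr = 3) →
    minSideJumpsLoop obs (PySem.List.len obs) js curr ans
      = minSideJumpsAltLoop obs (PySem.List.len obs) (minSideJumpsNxt (PySem.List.len obs) obs 0) js curr ans := by
  intro js
  induction js with
  | nil => intro curr ans _ _; rfl
  | cons i rest ih =>
    intro curr ans hmem hcurr
    obtain ⟨h0, h1⟩ := hmem i (by simp)
    have hrest : ∀ x ∈ rest, 0 ≤ x ∧ x + 1 < PySem.List.len obs :=
      fun x hx => hmem x (List.mem_cons_of_mem _ hx)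
    simp only [minSideJumpsLoop, minSideJumpsAltLoop]
    by_cases hb : (PySem.List.pyGetD obs (i + 1) 0 == curr) = true
    case neg =>
      rw [if_neg hb, if_neg hb]
      exact ih curr ans hrest hcurr
    case pos =>
    rw [if_pos hb, if_pos hb, diff_eq_filter curr (PySem.List.pyGetD obs i 0)]
    rcases hcurr with rfl | rfl | rfl
    · -- curr = 1
      by_cases ho2 : PySem.List.pyGetD obs i 0 = 2
      · have hc : List.filter (fun l => l != 1 && l != PySem.List.pyGetD obs i 0) [1, 2, 3] = [3] := by
          rw [ho2]; decide
        rw [hc, if_pos (by decide), if_pos (by decide), List.headD_cons,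
          (by decide : PySem.List.pyGetD [(3 : Int)] 0 0 = 3)]
        exact ih 3 (ans + 1) hrest (by norm_num)
      · by_cases ho3 : PySem.List.pyGetD obs i 0 = 3
        · have hc : List.filter (fun l => l != 1 && l != PySem.List.pyGetD obs i 0) [1, 2, 3] = [2] := by
            rw [ho3]; decide
          rw [hc, if_pos (by decide), if_pos (by decide), List.headD_cons,
            (by decide : PySem.List.pyGetD [(2 : Int)] 0 0 = 2)]
          exact ih 2 (ans + 1) hrest (by norm_num)
        · have hc : List.filter (fun l => l != 1 && l != PySem.List.pyGetD obs i 0) [1, 2, 3] = [2, 3] := by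
            simp [bne_iff_ne.mpr (show (2 : Int) ≠ PySem.List.pyGetD obs i 0 by omega),
              bne_iff_ne.mpr (show (3 : Int) ≠ PySem.List.pyGetD obs i 0 by omega)]
          rw [hc, if_neg (by decide), if_neg (by decide),
            (by decide : PySem.List.pyGetD [(2 : Int), 3] 0 0 = 2),
            (by decide : PySem.List.pyGetD [(2 : Int), 3] 1 0 = 3),
            inner_case obs i h0 h1 2 3 1 (by norm_num) (by norm_num)]
          split_ifs with hge hgt
          · rfl
          · exact ih 3 (ans + 1) hrest (by norm_num)
          · exact ih 2 (ans + 1) hrest (by norm_num)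
    · -- curr = 2
      by_cases ho1 : PySem.List.pyGetD obs i 0 = 1
      · have hc : List.filter (fun l => l != 2 && l != PySem.List.pyGetD obs i 0) [1, 2, 3] = [3] := by
          rw [ho1]; decide
        rw [hc, if_pos (by decide), if_pos (by decide), List.headD_cons,
          (by decide : PySem.List.pyGetD [(3 : Int)] 0 0 = 3)]
        exact ih 3 (ans + 1) hrest (by norm_num)
      · by_cases ho3 : PySem.List.pyGetD obs i 0 = 3
        · have hc : List.filter (fun l => l != 2 && l != PySem.List.pyGetD obs i 0) [1, 2, 3] = [1] := by
            rw [ho3]; decide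
          rw [hc, if_pos (by decide), if_pos (by decide), List.headD_cons,
            (by decide : PySem.List.pyGetD [(1 : Int)] 0 0 = 1)]
          exact ih 1 (ans + 1) hrest (by norm_num)
        · have hc : List.filter (fun l => l != 2 && l != PySem.List.pyGetD obs i 0) [1, 2, 3] = [1, 3] := by
            simp [bne_iff_ne.mpr (show (1 : Int) ≠ PySem.List.pyGetD obs i 0 by omega),
              bne_iff_ne.mpr (show (3 : Int) ≠ PySem.List.pyGetD obs i 0 by omega)]
          rw [hc, if_neg (by decide), if_neg (by decide),
            (by decide : PySem.List.pyGetD [(1 : Int), 3] 0 0 = 1),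
            (by decide : PySem.List.pyGetD [(1 : Int), 3] 1 0 = 3),
            inner_case obs i h0 h1 1 3 2 (by norm_num) (by norm_num)]
          split_ifs with hge hgt
          · rfl
          · exact ih 3 (ans + 1) hrest (by norm_num)
          · exact ih 1 (ans + 1) hrest (by norm_num)
    · -- curr = 3
      by_cases ho1 : PySem.List.pyGetD obs i 0 = 1
      · have hc : List.filter (fun l => l != 3 && l != PySem.List.pyGetD obs i 0) [1, 2, 3] = [2] := by
          rw [ho1]; decide
        rw [hc, if_pos (by decide), if_pos (by decide), List.headD_cons,
          (by decide : PySem.List.pyGetD [(2 : Int)] 0 0 = 2)]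
        exact ih 2 (ans + 1) hrest (by norm_num)
      · by_cases ho2 : PySem.List.pyGetD obs i 0 = 2
        · have hc : List.filter (fun l => l != 3 && l != PySem.List.pyGetD obs i 0) [1, 2, 3] = [1] := by
            rw [ho2]; decide
          rw [hc, if_pos (by decide), if_pos (by decide), List.headD_cons,
            (by decide : PySem.List.pyGetD [(1 : Int)] 0 0 = 1)]
          exact ih 1 (ans + 1) hrest (by norm_num)
        · have hc : List.filter (fun l => l != 3 && l != PySem.List.pyGetD obs i 0) [1, 2, 3] = [1, 2] := by
            simp [bne_iff_ne.mpr (show (1 : Int) ≠ PySem.List.pyGetD obs i 0 by omega),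
              bne_iff_ne.mpr (show (2 : Int) ≠ PySem.List.pyGetD obs i 0 by omega)]
          rw [hc, if_neg (by decide), if_neg (by decide),
            (by decide : PySem.List.pyGetD [(1 : Int), 2] 0 0 = 1),
            (by decide : PySem.List.pyGetD [(1 : Int), 2] 1 0 = 2),
            inner_case obs i h0 h1 1 2 3 (by norm_num) (by norm_num)]
          split_ifs with hge hgt
          · rfl
          · exact ih 2 (ans + 1) hrest (by norm_num)
          · exact ih 1 (ans + 1) hrest (by norm_num)

-- ===== VERDICT (by name: the statement is the Claim_ definition above) =====
theorem minSideJumps_spec : Claim_equal_minSideJumps := by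
  intro obs _
  unfold Spec_minSideJumps minSideJumps minSideJumps_alt
  refine loop_eq obs _ 2 0 ?_ (by omega)
  intro x hx
  rw [PySem.List.mem_pyRange_one] at hx
  simp [PySem.List.len_eq] at hx ⊢
  omega
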